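-- pv_equiv track=rewrite | github.com/aquang9124/algorithms_and_ds | codewars/pykata.py | max_rot
-- ===== SOURCE A (Python) =====
-- def max_rot(n):
-- 	# your code
-- 	max_n = n
-- 	rotations = len(str(n)) - 1
-- 	init_idx = -1
-- 	n = list(str(n))
--
-- 	while rotations > 0:
-- 		for i in range(init_idx + 1, len(n) - 1):
-- 			n[i], n[i + 1] = n[i + 1], n[i]
-- 		init_idx += 1
-- 		rotations -= 1
-- 		c_num = int(''.join(n))
-- 		if c_num > max_n:
-- 			max_n = c_num
--
-- 	return max_n
-- ===== SOURCE B (Python) =====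
-- def max_rot(n):
--     s = str(n)
--     best = n
--     for p in range(len(s) - 1):
--         s = s[:p] + s[p + 1:] + s[p]
--         best = max(best, int(s))
--     return best
-- ===== Notes on version B (the rewrite author's own statement) =====
-- stated objective: simpler
-- what changed: A's inner adjacent-swap sweep over a mutable char list (two nested loops) is replaced by a single loop that rebuilds the digit string with one slice expression s[:p]+s[p+1:]+s[p] per rotation.
import Mathlib
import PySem

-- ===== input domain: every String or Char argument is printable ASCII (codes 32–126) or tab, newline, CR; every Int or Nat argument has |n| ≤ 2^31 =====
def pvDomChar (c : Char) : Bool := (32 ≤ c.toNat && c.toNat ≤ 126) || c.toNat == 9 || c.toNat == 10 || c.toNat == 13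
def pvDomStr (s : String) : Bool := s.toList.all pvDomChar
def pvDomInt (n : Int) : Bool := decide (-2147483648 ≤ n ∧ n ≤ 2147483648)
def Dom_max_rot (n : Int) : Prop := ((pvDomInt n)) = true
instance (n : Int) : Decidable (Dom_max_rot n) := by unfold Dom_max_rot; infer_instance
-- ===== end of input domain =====

-- B replaces A's nested swap-sweep over a mutable char list by a single loop of slice
-- rotations s[:p] + s[p+1:] + s[p]; objective: simpler (one loop, no mutation).

-- ===== PORT A =====
-- body of A's inner for-loop: n[i], n[i+1] = n[i+1], n[i]
-- (range keeps i and i+1 in bounds, so the pyGetD/pySetD defaults are never taken)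
def pvSwapA (xs : List Char) (i : Int) : List Char :=
  let a := PySem.List.pyGetD xs i ' '
  let b := PySem.List.pyGetD xs (i + 1) ' '
  PySem.List.pySetD (PySem.List.pySetD xs i b) (i + 1) a

-- A's while-loop; 'rotations' decreases by exactly 1 each pass, so it is structural
-- recursion on rotations.toNat
def pvLoopA : Nat → Int → List Char → Int → Int
  | 0, _, _, max_n => max_n
  | r + 1, init_idx, n, max_n =>
      let n' := (PySem.List.pyRange (init_idx + 1) (PySem.List.len n - 1) 1).foldl pvSwapA n
      -- int(''.join(n)): under Pre_ (n ≥ 0) the list holds decimal digits only, so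
      -- ofChars? is always some and the getD default is never taken
      let c_num := (PySem.Int.ofChars? n').getD 0
      pvLoopA r (init_idx + 1) n' (if c_num > max_n then c_num else max_n)

def max_rot (n : Int) : Int :=
  let max_n := n
  let rotations := PySem.Str.len (PySem.Int.toStr n) - 1
  let init_idx : Int := -1
  let l := (PySem.Int.toStr n).toList
  pvLoopA rotations.toNat init_idx l max_n

-- ===== PORT B =====
-- body of B's loop: s = s[:p] + s[p+1:] + s[p]; best = max(best, int(s))
-- (p < len(s) by the range, so pyGetD's default is never taken; int(s) is some under Pre_)
def pvStepB (st : List Char × Int) (p : Int) : List Char × Int :=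
  let s := st.1
  let s' := PySem.List.slice s none (some p) ++ PySem.List.slice s (some (p + 1)) none
              ++ [PySem.List.pyGetD s p ' ']
  (s', max st.2 ((PySem.Int.ofChars? s').getD 0))

def max_rot_alt (n : Int) : Int :=
  let s := (PySem.Int.toStr n).toList
  ((PySem.List.pyRange 0 (PySem.Str.len (PySem.Int.toStr n) - 1) 1).foldl pvStepB (s, n)).2

-- ===== PRECONDITION & SPEC =====
-- Pre_ excludes negative n: there str(n) starts with '-' and both A and B raise
-- ValueError on int() of the rotated string.
def Pre_max_rot (n : Int) : Prop := 0 ≤ n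
instance (n : Int) : Decidable (Pre_max_rot n) := by unfold Pre_max_rot; infer_instance
def pvWitness_max_rot : Int := (10234)

def Spec_max_rot (n : Int) (out : Int) : Prop := out = max_rot_alt n
instance (n : Int) (out : Int) : Decidable (Spec_max_rot n out) := by unfold Spec_max_rot; infer_instance

-- ===== CLAIM (what is proved, stated in full; the proofs are below) =====
def Claim_equal_max_rot : Prop := ∀ (n : Int), Dom_max_rot n → Pre_max_rot n → Spec_max_rot n (max_rot n)

-- ===== LEMMAS AND PROOFS =====

-- A's swap written as take/cons/drop
lemma pvSwapA_eq (cs : List Char) (k : Nat) (hk : k + 1 < cs.length) :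
    pvSwapA cs (k : Int)
      = cs.take k ++ cs.getD (k + 1) ' ' :: cs.getD k ' ' :: cs.drop (k + 2) := by
  unfold pvSwapA
  have hc : (k : Int) + 1 = ((k + 1 : Nat) : Int) := by push_cast; ring
  rw [hc]
  simp only [PySem.List.pyGetD_natCast, PySem.List.pySetD_natCast]
  have hA : (cs.take k).length = k := by simp; omega
  have h1 : cs.set k (cs.getD (k + 1) ' ')
      = cs.take k ++ cs.getD (k + 1) ' ' :: cs.drop (k + 1) := by
    rw [List.set_eq_take_append_cons_drop, if_pos (show k < cs.length by omega)]
  rw [h1]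
  rw [List.set_eq_take_append_cons_drop,
    if_pos (show k + 1 < (cs.take k ++ cs.getD (k + 1) ' ' :: cs.drop (k + 1)).length by
      simp; omega)]
  have ht : (cs.take k ++ cs.getD (k + 1) ' ' :: cs.drop (k + 1)).take (k + 1)
      = cs.take k ++ [cs.getD (k + 1) ' '] := by
    rw [List.take_append, List.take_take, hA]
    rw [show min (k + 1) k = k from by omega, show k + 1 - k = 1 from by omega]
    rfl
  have hd : (cs.take k ++ cs.getD (k + 1) ' ' :: cs.drop (k + 1)).drop (k + 1 + 1)
      = cs.drop (k + 2) := by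
    rw [List.drop_append, hA]
    rw [show k + 1 + 1 - k = 2 from by omega]
    rw [List.drop_eq_nil_of_le (show (cs.take k).length ≤ k + 1 + 1 by simp; omega)]
    simp [List.drop_drop]
  rw [ht, hd]
  simp

-- A's inner sweep rotates the suffix starting at k one step to the left
lemma pvSweep_eq : ∀ (d k : Nat) (cs : List Char), k + d + 1 = cs.length →
    (PySem.List.pyRange (k : Int) ((cs.length : Int) - 1) 1).foldl pvSwapA cs
      = cs.take k ++ cs.drop (k + 1) ++ [cs.getD k ' '] := by
  intro d
  induction d with
  | zero =>
      intro k cs h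
      rw [PySem.List.pyRange_one_eq_nil (by omega)]
      simp only [List.foldl_nil]
      have hd : cs.drop (k + 1) = [] := List.drop_eq_nil_of_le (by omega)
      have hdk : cs.drop k = [cs.getD k ' '] := by
        rw [List.drop_eq_getElem_cons (show k < cs.length by omega)]
        rw [List.drop_eq_nil_of_le (by omega)]
        simp only [List.getD_eq_getElem?_getD,
          List.getElem?_eq_getElem (show k < cs.length by omega), Option.getD_some]
      rw [hd, List.append_nil]
      conv_lhs => rw [← List.take_append_drop k cs]
      rw [hdk]
  | succ d ih =>
      intro k cs h
      rw [PySem.List.pyRange_one_cons (by omega), List.foldl_cons]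
      rw [pvSwapA_eq cs k (by omega)]
      have hA : (cs.take k).length = k := by simp; omega
      have hlen : (cs.take k ++ cs.getD (k + 1) ' ' :: cs.getD k ' ' :: cs.drop (k + 2)).length
          = cs.length := by simp; omega
      have hc : (k : Int) + 1 = ((k + 1 : Nat) : Int) := by push_cast; ring
      rw [hc, show ((cs.length : Int))
        = ((cs.take k ++ cs.getD (k + 1) ' ' :: cs.getD k ' ' :: cs.drop (k + 2)).length : Int)
        from by rw [hlen]]
      rw [ih (k + 1) _ (by rw [hlen]; omega)]
      have h1 : (cs.take k ++ cs.getD (k + 1) ' ' :: cs.getD k ' ' :: cs.drop (k + 2)).take (k + 1)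
          = cs.take k ++ [cs.getD (k + 1) ' '] := by
        rw [List.take_append, List.take_take, hA]
        rw [show min (k + 1) k = k from by omega, show k + 1 - k = 1 from by omega]
        rfl
      have h2 : (cs.take k ++ cs.getD (k + 1) ' ' :: cs.getD k ' ' :: cs.drop (k + 2)).drop (k + 1 + 1)
          = cs.drop (k + 2) := by
        rw [List.drop_append, hA]
        rw [show k + 1 + 1 - k = 2 from by omega]
        rw [List.drop_eq_nil_of_le (show (cs.take k).length ≤ k + 1 + 1 by simp; omega)]
        rfl
      have h3 : (cs.take k ++ cs.getD (k + 1) ' ' :: cs.getD k ' ' :: cs.drop (k + 2)).getD (k + 1) ' '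
          = cs.getD k ' ' := by
        rw [List.getD_append_right _ _ _ _ (show (cs.take k).length ≤ k + 1 by
          simp only [List.length_take]; omega)]
        rw [hA, show k + 1 - k = 1 from by omega]
        rfl
      have hdrop : cs.drop (k + 1) = cs.getD (k + 1) ' ' :: cs.drop (k + 2) := by
        rw [List.drop_eq_getElem_cons (show k + 1 < cs.length by omega)]
        simp only [List.getD_eq_getElem?_getD,
          List.getElem?_eq_getElem (show k + 1 < cs.length by omega), Option.getD_some]
      rw [h1, h2, h3, hdrop]
      simp

-- the two loops run in lock-step
lemma pvMax_eq (b c : Int) : (if c > b then c else b) = max b c := by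
  rw [max_def]
  split_ifs <;> omega

lemma pvLoops_eq : ∀ (m k : Nat) (cs : List Char) (best : Int),
    (k : Int) + m = (cs.length : Int) - 1 →
    pvLoopA m ((k : Int) - 1) cs best
      = ((PySem.List.pyRange (k : Int) ((cs.length : Int) - 1) 1).foldl pvStepB (cs, best)).2 := by
  intro m
  induction m with
  | zero =>
      intro k cs best h
      rw [PySem.List.pyRange_one_eq_nil (by omega)]
      simp [pvLoopA]
  | succ m ih =>
      intro k cs best h
      rw [PySem.List.pyRange_one_cons (by omega), List.foldl_cons]
      simp only [pvLoopA, PySem.List.len_eq]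
      have hkk : (k : Int) - 1 + 1 = (k : Int) := by ring
      rw [hkk]
      rw [pvSweep_eq (m + 1) k cs (by omega)]
      have hc : (k : Int) + 1 = ((k + 1 : Nat) : Int) := by push_cast; ring
      have hstep : pvStepB (cs, best) (k : Int)
          = (cs.take k ++ cs.drop (k + 1) ++ [cs.getD k ' '],
             max best ((PySem.Int.ofChars? (cs.take k ++ cs.drop (k + 1) ++ [cs.getD k ' '])).getD 0)) := by
        simp only [pvStepB, hc, PySem.List.slice_to_natCast, PySem.List.slice_from_natCast,
          PySem.List.pyGetD_natCast]
      rw [hstep, pvMax_eq]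
      have hlen : (cs.take k ++ cs.drop (k + 1) ++ [cs.getD k ' ']).length = cs.length := by
        simp; omega
      have hthis := ih (k + 1) (cs.take k ++ cs.drop (k + 1) ++ [cs.getD k ' '])
        (max best ((PySem.Int.ofChars? (cs.take k ++ cs.drop (k + 1) ++ [cs.getD k ' '])).getD 0))
        (by rw [hlen]; push_cast at h ⊢; omega)
      rw [hlen] at hthis
      rw [show ((k + 1 : Nat) : Int) - 1 = (k : Int) from by push_cast; ring, ← hc] at hthis
      exact hthis

-- ===== VERDICT (by name: the statement is the Claim_ definition above) =====
theorem max_rot_spec : Claim_equal_max_rot := by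
  intro n hdom hpre
  unfold Spec_max_rot max_rot max_rot_alt
  simp only [PySem.Str.len_eq, PySem.Int.toList_toStr]
  by_cases hnil : (PySem.Int.toChars n).length = 0
  · rw [hnil]
    simp only [Nat.cast_zero, zero_sub, show ((-1 : Int)).toNat = 0 from rfl]
    rw [PySem.List.pyRange_one_eq_nil (by norm_num)]
    simp [pvLoopA]
  · have h1 : ((((PySem.Int.toChars n).length : Int) - 1)).toNat
        = (PySem.Int.toChars n).length - 1 := by omega
    rw [h1]
    have h2 := pvLoops_eq ((PySem.Int.toChars n).length - 1) 0
      (PySem.Int.toChars n) n (by push_cast; omega)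
    norm_num at h2
    exact h2
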